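-- pv_equiv track=rewrite | github.com/sbarczyk/WDI | Zestawy zadań/Zestaw 2/2.5.py | nowa_liczba
-- ===== SOURCE A (Python) =====
-- def nowa_liczba(n, mask):
--     liczba = i = 0
--     while n > 0:
--         if mask % 2 == 0:
--             pass
--         else:
--             liczba += (n%10) * 10 ** i
--             i += 1
--         mask //= 2
--         n //= 10
--     return liczba
-- ===== SOURCE B (Python) =====
-- def nowa_liczba(n, mask):
--     if n <= 0:
--         return 0
--     r = nowa_liczba(n // 10, mask // 2)
--     return r * 10 + n % 10 if mask % 2 == 1 else r
-- ===== Notes on version B (the rewrite author's own statement) =====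
-- stated objective: alternative
-- what changed: B replaces A's iterative accumulator loop with a 10**i power term by a direct recursion on the digits that packs the selected digits on the way back up (r*10 + digit), so no position counter or power is ever computed.
import Mathlib
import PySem

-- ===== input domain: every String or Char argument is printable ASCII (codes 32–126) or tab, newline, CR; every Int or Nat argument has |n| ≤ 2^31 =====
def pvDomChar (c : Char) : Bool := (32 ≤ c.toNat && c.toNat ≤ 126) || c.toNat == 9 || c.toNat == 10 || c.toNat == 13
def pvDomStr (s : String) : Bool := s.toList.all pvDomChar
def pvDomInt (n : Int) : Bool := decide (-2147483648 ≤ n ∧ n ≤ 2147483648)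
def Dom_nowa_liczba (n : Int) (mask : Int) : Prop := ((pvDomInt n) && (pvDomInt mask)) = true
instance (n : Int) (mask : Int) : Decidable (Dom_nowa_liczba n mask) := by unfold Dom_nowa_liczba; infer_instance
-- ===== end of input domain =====

-- B packs the selected digits by direct recursion on the digits (r*10 + digit on the way back), replacing A's loop with its 10**i power term; alternative decomposition, same behaviour.


-- ===== PORT A =====
-- A's while loop; fuel = n.toNat is a termination guard only, never exhausted while n > 0
-- (n // 10 strictly shrinks); i counts selected digits, kept as Nat for the power 10 ** i.
def nowaLoopA : Nat → Int → Int → Int → Nat → Int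
  | 0, _, _, liczba, _ => liczba
  | fuel + 1, n, mask, liczba, i =>
    if n > 0 then
      if PySem.Int.mod mask 2 == 0 then
        nowaLoopA fuel (PySem.Int.floordiv n 10) (PySem.Int.floordiv mask 2) liczba i
      else
        nowaLoopA fuel (PySem.Int.floordiv n 10) (PySem.Int.floordiv mask 2)
          (liczba + (PySem.Int.mod n 10) * 10 ^ i) (i + 1)
    else liczba

def nowa_liczba (n : Int) (mask : Int) : Int := nowaLoopA n.toNat n mask 0 0

-- ===== PORT B =====
-- Source B's recursion, ported by well-founded recursion on n.toNat (n // 10 < n for n > 0)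
def nowa_liczba_alt (n : Int) (mask : Int) : Int :=
  if h : n ≤ 0 then 0
  else
    let r := nowa_liczba_alt (PySem.Int.floordiv n 10) (PySem.Int.floordiv mask 2)
    if PySem.Int.mod mask 2 == 1 then r * 10 + PySem.Int.mod n 10 else r
termination_by n.toNat
decreasing_by
  have h10 : PySem.Int.floordiv n 10 = n / 10 := PySem.Int.floordiv_eq_ediv_of_pos (by omega)
  omega

-- ===== PRECONDITION & SPEC =====
def Spec_nowa_liczba (n : Int) (mask : Int) (out : Int) : Prop := out = nowa_liczba_alt n mask
instance (n : Int) (mask : Int) (out : Int) : Decidable (Spec_nowa_liczba n mask out) := by unfold Spec_nowa_liczba; infer_instance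

-- ===== CLAIM (what is proved, stated in full; the proofs are below) =====
def Claim_equal_nowa_liczba : Prop := ∀ (n : Int) (mask : Int), Dom_nowa_liczba n mask → Spec_nowa_liczba n mask (nowa_liczba n mask)

-- ===== LEMMAS AND PROOFS =====

-- A's loop, given enough fuel, computes liczba + 10^i * (B's recursive value)
lemma nowaLoopA_eq_alt (fuel : Nat) :
    ∀ (n mask liczba : Int) (i : Nat), n.toNat ≤ fuel →
      nowaLoopA fuel n mask liczba i = liczba + 10 ^ i * nowa_liczba_alt n mask := by
  induction fuel with
  | zero =>
      intro n mask liczba i hf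
      have hn : n ≤ 0 := by omega
      rw [nowaLoopA, nowa_liczba_alt]
      simp [hn]
  | succ fuel ih =>
      intro n mask liczba i hf
      rw [nowaLoopA]
      by_cases hn : n > 0
      · have hfd : (PySem.Int.floordiv n 10).toNat ≤ fuel := by
          have h10 : PySem.Int.floordiv n 10 = n / 10 := PySem.Int.floordiv_eq_ediv_of_pos (by omega)
          have hd := Int.mul_ediv_add_emod n 10
          have hr := Int.emod_nonneg n (by omega : (10:Int) ≠ 0)
          have hr2 := Int.emod_lt_of_pos n (by omega : (0:Int) < 10)
          omega
        rw [nowa_liczba_alt]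
        simp only [hn, if_pos, dif_neg (by omega : ¬ n ≤ 0)]
        have hmb : 0 ≤ PySem.Int.mod mask 2 ∧ PySem.Int.mod mask 2 < 2 :=
          ⟨PySem.Int.mod_nonneg mask (by omega), PySem.Int.mod_lt mask (by omega)⟩
        by_cases hm : PySem.Int.mod mask 2 == 0
        · have hm1 : ¬ (PySem.Int.mod mask 2 == 1) = true := by simp_all
          simp only [hm, if_pos, hm1]
          exact ih _ _ _ _ hfd
        · have hm1 : (PySem.Int.mod mask 2 == 1) = true := by
            simp only [beq_iff_eq] at hm ⊢; omega
          simp only [hm, if_neg, hm1, if_pos, Bool.not_eq_true]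
          rw [ih _ _ _ _ hfd]
          ring
      · have hn' : n ≤ 0 := by omega
        rw [nowa_liczba_alt]
        simp [hn, hn']

-- ===== VERDICT (by name: the statement is the Claim_ definition above) =====
theorem nowa_liczba_spec : Claim_equal_nowa_liczba := by
  intro n mask _
  unfold Spec_nowa_liczba nowa_liczba
  rw [nowaLoopA_eq_alt n.toNat n mask 0 0 (le_refl _)]
  ring
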